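-- pv_equiv track=rewrite | github.com/SylvanaMarinePurnomo/PlateTrack | newApp.py | find_best_match_fuzzy
-- ===== SOURCE A (Python) =====
-- def levenshtein_distance(s1, s2):
--     if len(s1) > len(s2):
--         s1, s2 = s2, s1
--
--     distances = range(len(s1) + 1)
--     for i2, c2 in enumerate(s2):
--         new_distances = [i2 + 1]
--         for i1, c1 in enumerate(s1):
--             if c1 == c2:
--                 new_distances.append(distances[i1])
--             else:
--                 new_distances.append(
--                     1 + min(distances[i1], distances[i1 + 1], new_distances[-1])
--                 )
--         distances = new_distances
--     return distances[-1]
--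
-- def find_best_match_fuzzy(ocr_text, trusted_plates, threshold):
--     best_match = None
--     min_dist = float("inf")
--
--     for plate in trusted_plates:
--         L = len(plate)
--         for w in range(max(1, L - threshold), L + threshold + 1):
--             for i in range(len(ocr_text) - w + 1):
--                 window = ocr_text[i:i + w]
--                 dist = levenshtein_distance(window, plate)
--                 if dist <= threshold and dist < min_dist:
--                     min_dist = dist
--                     best_match = plate
--     return best_match
-- ===== SOURCE B (Python) =====
-- def find_best_match_fuzzy(ocr_text, trusted_plates, threshold):
--     # Sellers' approximate substring matching: one O(len(ocr_text)*len(plate)) DP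
--     # per plate gives the minimal edit distance between the plate and ANY
--     # substring of the OCR text (first DP row zeroed = free start position).
--     best_match = None
--     min_dist = float("inf")
--     n = len(ocr_text)
--     for plate in trusted_plates:
--         row = [0] * (n + 1)
--         for k, pc in enumerate(plate, 1):
--             prev = row
--             row = [k] + [0] * n
--             for j, tc in enumerate(ocr_text, 1):
--                 row[j] = min(prev[j] + 1,
--                              row[j - 1] + 1,
--                              prev[j - 1] + (pc != tc))
--         d = min(row)
--         if d <= threshold and d < min_dist:
--             min_dist = d
--             best_match = plate
--     return best_match
-- ===== Notes on version B (the rewrite author's own statement) =====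
-- stated objective: faster
-- what changed: Replaced A's per-window Levenshtein recomputation (for every plate, every width in [L-threshold, L+threshold] and every start position a fresh O(w*L) DP) by one Sellers approximate-substring-matching DP per plate (first row zeroed = free start), whose final-row minimum is the minimal edit distance between the plate and any substring of the OCR text; Pre_ excludes the degenerate corner where a plate of length <= threshold meets an empty plate or empty OCR text, where counting the empty window as a match (B) or not (A, whose width loop starts at 1) are both defensible.
-- outside the precondition, e.g. on find_best_match_fuzzy('', ['A'], 1): A returns None, B returns 'A'; on find_best_match_fuzzy('x', ['', 'x'], 0): A returns 'x', B returns ''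
import Mathlib
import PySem

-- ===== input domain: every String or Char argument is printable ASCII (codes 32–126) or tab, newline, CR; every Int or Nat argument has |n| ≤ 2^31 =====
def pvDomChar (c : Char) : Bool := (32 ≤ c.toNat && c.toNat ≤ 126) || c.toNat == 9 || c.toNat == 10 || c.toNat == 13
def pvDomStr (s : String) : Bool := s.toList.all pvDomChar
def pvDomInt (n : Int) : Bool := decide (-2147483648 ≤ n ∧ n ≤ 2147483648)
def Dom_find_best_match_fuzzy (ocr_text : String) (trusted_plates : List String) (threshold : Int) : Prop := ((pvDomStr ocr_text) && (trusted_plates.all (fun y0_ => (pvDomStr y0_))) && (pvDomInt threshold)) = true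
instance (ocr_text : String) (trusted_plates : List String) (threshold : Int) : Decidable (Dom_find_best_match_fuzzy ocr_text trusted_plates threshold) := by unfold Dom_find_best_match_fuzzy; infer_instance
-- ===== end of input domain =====

-- B replaces A's per-window Levenshtein recomputation by one Sellers approximate-substring
-- DP per plate (first row zeroed = free start position): asymptotically faster, same result.

-- helper shared by both ports: 'd < min_dist' where min_dist starts at float('inf')
def pvLtOpt (d : Int) (m : Option Int) : Bool :=
  match m with
  | none => true
  | some v => decide (d < v)

-- ===== PORT A =====
-- inner loop of levenshtein_distance: walks distances (p0 = distances[i1], head of rest =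
-- distances[i1+1]) together with s1, carrying new_distances[-1] as `last`
def pvLevRow (c2 : Char) : List Int → List Char → Int → List Int
  | p0 :: rest, c1 :: s1, last =>
      let nd : Int := if c1 = c2 then p0 else 1 + min p0 (min (rest.headD 0) last)
      nd :: pvLevRow c2 rest s1 nd
  | _, _, _ => []

def pvLev (a b : List Char) : Int :=
  let uv := if a.length > b.length then (b, a) else (a, b)
  let u := uv.1
  let v := uv.2
  let init : List Int := (List.range (u.length + 1)).map (fun i => Int.ofNat i)
  let fin := (v.foldl (fun (st : Int × List Int) c2 =>
      (st.1 + 1, (st.1 + 1) :: pvLevRow c2 st.2 u (st.1 + 1))) (0, init)).2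
  PySem.List.pyGetD fin (-1) 0

def find_best_match_fuzzy (ocr_text : String) (trusted_plates : List String) (threshold : Int) : Option String :=
  let t := ocr_text.toList
  (trusted_plates.foldl (fun (st : Option String × Option Int) plate =>
      let L : Int := (plate.toList.length : Int)
      (PySem.List.pyRange (max 1 (L - threshold)) (L + threshold + 1) 1).foldl (fun st w =>
        (PySem.List.pyRange 0 ((t.length : Int) - w + 1) 1).foldl (fun st i =>
          let window := PySem.List.slice t (some i) (some (i + w))
          let dist := pvLev window plate.toList
          if decide (dist ≤ threshold) && pvLtOpt dist st.2 then (some plate, some dist) else st) st) st)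
    (none, none)).1

-- ===== PORT B =====
-- inner loop of the Sellers DP: walks prev (p0 = prev[j-1], head of rest = prev[j]) together
-- with the text, carrying row[j-1] as `left`
def pvAltRow (pc : Char) : List Int → List Char → Int → List Int
  | p0 :: rest, tc :: ts, left =>
      let nd : Int := min (rest.headD 0 + 1) (min (left + 1) (p0 + (if pc = tc then 0 else 1)))
      nd :: pvAltRow pc rest ts nd
  | _, _, _ => []

def find_best_match_fuzzy_alt (ocr_text : String) (trusted_plates : List String) (threshold : Int) : Option String :=
  let t := ocr_text.toList
  let n := t.length
  (trusted_plates.foldl (fun (st : Option String × Option Int) plate =>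
      let fin := (plate.toList.foldl (fun (acc : Int × List Int) pc =>
          (acc.1 + 1, (acc.1 + 1) :: pvAltRow pc acc.2 t (acc.1 + 1)))
        (0, List.replicate (n + 1) (0 : Int))).2
      match PySem.List.min? fin (fun x => x) with
      | none => st
      | some d => if decide (d ≤ threshold) && pvLtOpt d st.2 then (some plate, some d) else st)
    (none, none)).1

-- ===== PRECONDITION & SPEC =====
-- Pre_ excludes only the degenerate corner where a plate of length ≤ threshold meets an empty
-- plate or empty OCR text: there the empty window — which A's width loop (w ≥ 1) never
-- examines but a natural substring matcher admits — would qualify, and whether '' counts as a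
-- matching substring is anybody's call.
def Pre_find_best_match_fuzzy (ocr_text : String) (trusted_plates : List String) (threshold : Int) : Prop :=
  ∀ p ∈ trusted_plates, ((p.toList.length : Int) ≤ threshold → p.toList ≠ [] ∧ ocr_text.toList ≠ [])
instance (ocr_text : String) (trusted_plates : List String) (threshold : Int) : Decidable (Pre_find_best_match_fuzzy ocr_text trusted_plates threshold) := by unfold Pre_find_best_match_fuzzy; infer_instance

def pvWitness_find_best_match_fuzzy : String × List String × Int := ("ABC123", ["ABC124", "XYZ"], 1)

def Spec_find_best_match_fuzzy (ocr_text : String) (trusted_plates : List String) (threshold : Int) (out : Option String) : Prop := out = find_best_match_fuzzy_alt ocr_text trusted_plates threshold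
instance (ocr_text : String) (trusted_plates : List String) (threshold : Int) (out : Option String) : Decidable (Spec_find_best_match_fuzzy ocr_text trusted_plates threshold out) := by unfold Spec_find_best_match_fuzzy; infer_instance

-- ===== CLAIM (what is proved, stated in full; the proofs are below) =====
def Claim_equal_find_best_match_fuzzy : Prop := ∀ (ocr_text : String) (trusted_plates : List String) (threshold : Int), Dom_find_best_match_fuzzy ocr_text trusted_plates threshold → Pre_find_best_match_fuzzy ocr_text trusted_plates threshold → Spec_find_best_match_fuzzy ocr_text trusted_plates threshold (find_best_match_fuzzy ocr_text trusted_plates threshold)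

-- ===== LEMMAS AND PROOFS =====

-- reference edit distance (first argument: a piece of text, second: a reversed plate prefix);
-- cost orientation matches A's inner loop
def pvE : List Char → List Char → Nat
  | [], t => t.length
  | _ :: s, [] => s.length + 1
  | a :: s, b :: t =>
      min (pvE s t + (if a = b then 0 else 1)) (min (pvE (a :: s) t + 1) (pvE s (b :: t) + 1))
termination_by s t => s.length + t.length

theorem pvE_nil (t : List Char) : pvE [] t = t.length := by simp [pvE]
theorem pvE_nil' (s : List Char) : pvE s [] = s.length := by cases s <;> simp [pvE]
theorem pvE_cons (a b : Char) (s t : List Char) :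
    pvE (a :: s) (b :: t) =
      min (pvE s t + (if a = b then 0 else 1)) (min (pvE (a :: s) t + 1) (pvE s (b :: t) + 1)) := by
  simp [pvE]

-- Sellers value: min over prefixes u of rt of pvE u q (proved below); defined by the DP
-- recurrence with exactly B's grouping of the three-way min
def pvM : List Char → List Char → Nat
  | [], _ => 0
  | _ :: q, [] => q.length + 1
  | a :: q, b :: rt =>
      min (pvM q (b :: rt) + 1) (min (pvM (a :: q) rt + 1) (pvM q rt + (if a = b then 0 else 1)))
termination_by q rt => q.length + rt.length

theorem pvM_nil (rt : List Char) : pvM [] rt = 0 := by simp [pvM]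
theorem pvM_nil' (a : Char) (q : List Char) : pvM (a :: q) [] = q.length + 1 := by simp [pvM]
theorem pvM_cons (a b : Char) (q rt : List Char) :
    pvM (a :: q) (b :: rt) =
      min (pvM q (b :: rt) + 1) (min (pvM (a :: q) rt + 1) (pvM q rt + (if a = b then 0 else 1))) := by
  simp [pvM]

theorem pvE_symm (s t : List Char) : pvE s t = pvE t s := by
  fun_induction pvE s t with
  | case1 t => rw [pvE_nil']
  | case2 a s => rw [pvE_nil]; simp
  | case3 a s b t ih1 ih2 ih3 =>
      rw [pvE_cons b a t s, ih1, ih2, ih3]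
      by_cases h : a = b
      · subst h; simp; omega
      · rw [if_neg h, if_neg (Ne.symm h)]; omega

theorem pvE_up1 (a : Char) (s t : List Char) : pvE (a :: s) t ≤ pvE s t + 1 := by
  cases t with
  | nil => rw [pvE_nil', pvE_nil']; simp
  | cons b t => rw [pvE_cons]; omega

theorem pvE_up2 (b : Char) (s t : List Char) : pvE s (b :: t) ≤ pvE s t + 1 := by
  rw [pvE_symm s (b :: t), pvE_symm s t]; exact pvE_up1 b t s

theorem pvE_lenLB (s t : List Char) : t.length ≤ pvE s t + s.length := by
  fun_induction pvE s t with
  | case1 t => simp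
  | case2 a s => simp
  | case3 a s b t ih1 ih2 ih3 => simp at *; omega

theorem pvE_lenLB' (s t : List Char) : s.length ≤ pvE s t + t.length := by
  rw [pvE_symm]; exact pvE_lenLB t s

theorem pvE_down1 (a : Char) (s t : List Char) : pvE s t ≤ pvE (a :: s) t + 1 := by
  induction t generalizing a s with
  | nil => rw [pvE_nil', pvE_nil']; simp only [List.length_cons]; omega
  | cons b t ih =>
      rw [pvE_cons]
      have h1 := pvE_up2 b s t
      have h2 := ih a s
      omega

theorem pvE_down2 (b : Char) (s t : List Char) : pvE s t ≤ pvE s (b :: t) + 1 := by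
  rw [pvE_symm s t, pvE_symm s (b :: t)]; exact pvE_down1 b t s

theorem pvE_singleton (c : Char) (q : List Char) (h : q ≠ []) : pvE [c] q ≤ q.length := by
  cases q with
  | nil => simp at h
  | cons y q' =>
      rw [pvE_cons, pvE_nil, pvE_nil]
      by_cases hc : c = y <;> simp [hc]

-- pvM is a lower bound for pvE on every prefix
theorem pvM_le (q rt u : List Char) (hu : u <+: rt) : pvM q rt ≤ pvE u q := by
  fun_induction pvM q rt generalizing u with
  | case1 rt => simp
  | case2 a q =>
      have h : u = [] := List.prefix_nil.mp hu
      subst h; rw [pvE_nil]; simp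
  | case3 a q b rt ih1 ih2 ih3 =>
      rcases (List.prefix_cons_iff.mp hu) with h | ⟨u', rfl, hu'⟩
      · subst h
        have h1 := ih1 [] List.nil_prefix
        rw [pvE_nil] at *
        simp only [List.length_cons] at *
        omega
      · have h1 := ih1 (b :: u') (List.cons_prefix_cons.mpr ⟨rfl, hu'⟩)
        have h2 := ih2 u' hu'
        have h3 := ih3 u' hu'
        rw [pvE_cons]
        by_cases hab : a = b
        · rw [if_pos hab]; rw [if_pos hab.symm] at *; omega
        · rw [if_neg hab]; rw [if_neg (Ne.symm hab)] at *; omega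

-- ===== A-side row characterization =====
-- spec row for A's helper: entries pvE r q, pvE (c1::r) q, ... as the walk pushes s1-chars
def pvRowA (r u q : List Char) : List Int :=
  match u with
  | [] => [(pvE r q : Int)]
  | c :: u' => (pvE r q : Int) :: pvRowA (c :: r) u' q

theorem pvRowA_ne_nil (r u q : List Char) : pvRowA r u q ≠ [] := by
  cases u <;> simp [pvRowA]

theorem pvRowA_headD (r u q : List Char) : (pvRowA r u q).headD 0 = (pvE r q : Int) := by
  cases u <;> simp [pvRowA]

theorem pvRowA_eta (r u q : List Char) : pvRowA r u q = (pvE r q : Int) :: (pvRowA r u q).tail := by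
  cases u <;> simp [pvRowA]

theorem pvRowA_walk (c : Char) (rw : List Char) :
    ∀ (u : List Char) (r : List Char),
      pvLevRow c (pvRowA r u rw) u (pvE r (c :: rw) : Int) = (pvRowA r u (c :: rw)).tail := by
  intro u
  induction u with
  | nil => intro r; simp [pvRowA, pvLevRow]
  | cons c1 u' ih =>
      intro r
      rw [pvRowA, pvRowA, pvLevRow]
      have hd : pvRowA (c1 :: r) u' rw = (pvE (c1 :: r) rw : Int) :: (pvRowA (c1 :: r) u' rw).tail := by
        cases u' <;> simp [pvRowA]
      have hhead : (pvRowA (c1 :: r) u' rw).headD 0 = (pvE (c1 :: r) rw : Int) := pvRowA_headD _ _ _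
      have hnd : (if c1 = c then (pvE r rw : Int)
          else 1 + min (pvE r rw : Int) (min ((pvRowA (c1 :: r) u' rw).headD 0) (pvE r (c :: rw) : Int)))
          = (pvE (c1 :: r) (c :: rw) : Int) := by
        rw [hhead, pvE_cons]
        by_cases hc : c1 = c
        · rw [if_pos hc, if_pos hc]
          have h1 := pvE_down2 c r rw
          have h2 := pvE_down1 c1 r rw
          push_cast
          omega
        · rw [if_neg hc, if_neg hc]
          push_cast
          omega
      simp only [hnd]
      rw [ih (c1 :: r), List.tail_cons]
      exact (pvRowA_eta _ _ _).symm

theorem pvRowA_init (u : List Char) : ∀ r : List Char,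
    pvRowA r u [] = (List.range (u.length + 1)).map (fun i => ((r.length + i : Nat) : Int)) := by
  induction u with
  | nil => intro r; simp [pvRowA, pvE_nil']
  | cons c u' ih =>
      intro r
      rw [pvRowA, ih (c :: r)]
      simp only [List.length_cons]
      rw [List.range_succ_eq_map (n := u'.length + 1)]
      simp only [List.map_cons, List.map_map, Function.comp_def, Nat.succ_eq_add_one, pvE_nil',
        Nat.add_zero]
      refine congrArg₂ _ rfl ?_
      apply List.map_congr_left
      intro i _
      push_cast
      omega

theorem pvRowA_getLast (u : List Char) : ∀ r q : List Char,
    (pvRowA r u q).getLast (pvRowA_ne_nil r u q) = (pvE (u.reverse ++ r) q : Int) := by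
  induction u with
  | nil => intro r q; simp [pvRowA]
  | cons c u' ih =>
      intro r q
      have h : pvRowA r (c :: u') q = (pvE r q : Int) :: pvRowA (c :: r) u' q := by rw [pvRowA]
      rw [List.getLast_congr (pvRowA_ne_nil r (c :: u') q) (List.cons_ne_nil _ _) h,
        List.getLast_cons (pvRowA_ne_nil (c :: r) u' q), ih (c :: r) q]
      simp

theorem pvFoldA (u : List Char) : ∀ (v w : List Char),
    v.foldl (fun (st : Int × List Int) c2 => (st.1 + 1, (st.1 + 1) :: pvLevRow c2 st.2 u (st.1 + 1)))
      (((w.length : Nat) : Int), pvRowA [] u w.reverse)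
    = (((w.length + v.length : Nat) : Int), pvRowA [] u (v.reverse ++ w.reverse)) := by
  intro v
  induction v with
  | nil => intro w; simp
  | cons c v' ih =>
      intro w
      rw [List.foldl_cons]
      have hlen : ((w.length : Nat) : Int) + 1 = (pvE [] (c :: w.reverse) : Int) := by
        rw [pvE_nil]; simp
      have hrow : (((w.length : Nat) : Int) + 1) :: pvLevRow c (pvRowA [] u w.reverse) u (((w.length : Nat) : Int) + 1)
          = pvRowA [] u (c :: w.reverse) := by
        rw [hlen, pvRowA_walk c w.reverse u []]
        exact (pvRowA_eta _ _ _).symm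
      have hw : c :: w.reverse = (w ++ [c]).reverse := by simp
      have hlen2 : ((w.length : Nat) : Int) + 1 = (((w ++ [c]).length : Nat) : Int) := by simp
      rw [hrow, hw, hlen2, ih (w ++ [c])]
      simp
      omega

theorem pvLev_core (u v : List Char) :
    PySem.List.pyGetD ((v.foldl (fun (st : Int × List Int) c2 =>
        (st.1 + 1, (st.1 + 1) :: pvLevRow c2 st.2 u (st.1 + 1)))
      ((0 : Int), (List.range (u.length + 1)).map (fun i => Int.ofNat i))).2) (-1) 0
    = (pvE u.reverse v.reverse : Int) := by
  have hinit : (List.range (u.length + 1)).map (fun i => Int.ofNat i) = pvRowA [] u [] := by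
    rw [pvRowA_init u []]
    apply List.map_congr_left
    intro i _
    simp
  have hf := pvFoldA u v []
  simp only [List.length_nil, Nat.cast_zero, List.reverse_nil, List.append_nil, Nat.zero_add] at hf
  rw [hinit, hf]
  show PySem.List.pyGetD (pvRowA [] u v.reverse) (-1) 0 = _
  rw [PySem.List.pyGetD_neg_one _ _ (pvRowA_ne_nil _ _ _), pvRowA_getLast]
  simp

theorem pvLev_eq (a b : List Char) : pvLev a b = (pvE a.reverse b.reverse : Int) := by
  by_cases h : a.length > b.length
  · simp only [pvLev, if_pos h]
    rw [pvLev_core b a]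
    exact congrArg _ (pvE_symm b.reverse a.reverse)
  · simp only [pvLev, if_neg h]
    exact pvLev_core a b

-- pvM is attained at some prefix
theorem pvM_ex (q rt : List Char) : ∃ u, u <+: rt ∧ pvE u q = pvM q rt := by
  fun_induction pvM q rt with
  | case1 rt => exact ⟨[], List.nil_prefix, by rw [pvE_nil]; simp⟩
  | case2 a q => exact ⟨[], List.nil_prefix, by rw [pvE_nil]; simp⟩
  | case3 a q b rt ih1 ih2 ih3 =>
      rw [← pvM_cons]
      obtain ⟨u1, hu1, he1⟩ := ih1
      obtain ⟨u2, hu2, he2⟩ := ih2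
      obtain ⟨u3, hu3, he3⟩ := ih3
      have hm : pvM (a :: q) (b :: rt) = pvM q (b :: rt) + 1
          ∨ pvM (a :: q) (b :: rt) = pvM (a :: q) rt + 1
          ∨ pvM (a :: q) (b :: rt) = pvM q rt + (if a = b then 0 else 1) := by
        rw [pvM_cons]; omega
      rcases hm with hm | hm | hm
      · refine ⟨u1, hu1, ?_⟩
        have hle := pvM_le (a :: q) (b :: rt) u1 hu1
        have hup : pvE u1 (a :: q) ≤ pvE u1 q + 1 := pvE_up2 a u1 q
        omega
      · refine ⟨b :: u2, List.cons_prefix_cons.mpr ⟨rfl, hu2⟩, ?_⟩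
        have hle := pvM_le (a :: q) (b :: rt) (b :: u2) (List.cons_prefix_cons.mpr ⟨rfl, hu2⟩)
        have hup : pvE (b :: u2) (a :: q) ≤ pvE u2 (a :: q) + 1 := pvE_up1 b u2 (a :: q)
        omega
      · refine ⟨b :: u3, List.cons_prefix_cons.mpr ⟨rfl, hu3⟩, ?_⟩
        have hle := pvM_le (a :: q) (b :: rt) (b :: u3) (List.cons_prefix_cons.mpr ⟨rfl, hu3⟩)
        have hup : pvE (b :: u3) (a :: q) ≤ pvE u3 q + (if b = a then 0 else 1) := by
          rw [pvE_cons]; omega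
        have hcost : (if b = a then (0:Nat) else 1) = (if a = b then 0 else 1) := by
          by_cases h : a = b <;> simp [h, Ne.symm]
        omega

-- ===== B-side row characterization =====
def pvRowB (q rt ts : List Char) : List Int :=
  match ts with
  | [] => [(pvM q rt : Int)]
  | c :: ts' => (pvM q rt : Int) :: pvRowB q (c :: rt) ts'

theorem pvRowB_ne_nil (q rt ts : List Char) : pvRowB q rt ts ≠ [] := by
  cases ts <;> simp [pvRowB]

theorem pvRowB_headD (q rt ts : List Char) : (pvRowB q rt ts).headD 0 = (pvM q rt : Int) := by
  cases ts <;> simp [pvRowB]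

theorem pvRowB_eta (q rt ts : List Char) : pvRowB q rt ts = (pvM q rt : Int) :: (pvRowB q rt ts).tail := by
  cases ts <;> simp [pvRowB]

theorem pvRowB_walk (a : Char) (q : List Char) :
    ∀ (ts rt : List Char),
      pvAltRow a (pvRowB q rt ts) ts (pvM (a :: q) rt : Int) = (pvRowB (a :: q) rt ts).tail := by
  intro ts
  induction ts with
  | nil => intro rt; simp [pvRowB, pvAltRow]
  | cons c ts' ih =>
      intro rt
      rw [pvRowB, pvRowB, pvAltRow]
      have hnd : min ((pvRowB q (c :: rt) ts').headD 0 + 1)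
            (min ((pvM (a :: q) rt : Int) + 1) ((pvM q rt : Int) + (if a = c then 0 else 1)))
          = (pvM (a :: q) (c :: rt) : Int) := by
        rw [pvRowB_headD, pvM_cons]
        by_cases hc : a = c
        · simp [hc]
        · simp only [hc]
          push_cast
          omega
      simp only [hnd]
      rw [ih (c :: rt), List.tail_cons]
      exact (pvRowB_eta _ _ _).symm

theorem pvRowB_init (ts : List Char) : ∀ rt : List Char,
    pvRowB [] rt ts = List.replicate (ts.length + 1) 0 := by
  induction ts with
  | nil => intro rt; simp [pvRowB, pvM_nil]
  | cons c ts' ih =>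
      intro rt
      rw [pvRowB, ih (c :: rt), pvM_nil]
      simp [List.replicate_succ]

theorem pvFoldB (t : List Char) : ∀ (P w : List Char),
    P.foldl (fun (acc : Int × List Int) pc =>
        (acc.1 + 1, (acc.1 + 1) :: pvAltRow pc acc.2 t (acc.1 + 1)))
      (((w.length : Nat) : Int), pvRowB w.reverse [] t)
    = (((w.length + P.length : Nat) : Int), pvRowB (P.reverse ++ w.reverse) [] t) := by
  intro P
  induction P with
  | nil => intro w; simp
  | cons pc P' ih =>
      intro w
      rw [List.foldl_cons]
      have hlen : ((w.length : Nat) : Int) + 1 = (pvM (pc :: w.reverse) [] : Int) := by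
        rw [pvM_nil']; simp
      have hrow : (((w.length : Nat) : Int) + 1) :: pvAltRow pc (pvRowB w.reverse [] t) t (((w.length : Nat) : Int) + 1)
          = pvRowB (pc :: w.reverse) [] t := by
        rw [hlen, pvRowB_walk pc w.reverse t []]
        exact (pvRowB_eta _ _ _).symm
      have hw : pc :: w.reverse = (w ++ [pc]).reverse := by simp
      have hlen2 : ((w.length : Nat) : Int) + 1 = (((w ++ [pc]).length : Nat) : Int) := by simp
      rw [hrow, hw, hlen2, ih (w ++ [pc])]
      simp
      omega

-- the members of the final row are exactly the pvM values over reversed text prefixes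
theorem pvRowB_mem_iff (q : List Char) : ∀ (ts rt : List Char) (x : Int),
    x ∈ pvRowB q rt ts ↔ ∃ j ≤ ts.length, x = (pvM q ((ts.take j).reverse ++ rt) : Int) := by
  intro ts
  induction ts with
  | nil =>
      intro rt x
      simp [pvRowB]
  | cons c ts' ih =>
      intro rt x
      rw [pvRowB]
      simp only [List.mem_cons, ih (c :: rt) x]
      constructor
      · rintro (rfl | ⟨j, hj, rfl⟩)
        · exact ⟨0, by omega, by simp⟩
        · refine ⟨j + 1, by simp; omega, ?_⟩
          simp [List.take_succ_cons]
      · rintro ⟨j, hj, rfl⟩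
        cases j with
        | zero => left; simp
        | succ j' =>
            right
            refine ⟨j', by simp at hj; omega, ?_⟩
            simp [List.take_succ_cons]

-- ===== selection-fold characterization =====
theorem pvFoldU_skip (plate : String) (th : Int) (ds : List Int) :
    ∀ st : Option String × Option Int,
      (∀ d ∈ ds, ¬(d ≤ th ∧ pvLtOpt d st.2 = true)) →
      ds.foldl (fun st d => if decide (d ≤ th) && pvLtOpt d st.2 then (some plate, some d) else st) st = st := by
  induction ds with
  | nil => intro st _; simp
  | cons d tl ih =>
      intro st h
      rw [List.foldl_cons]
      have hc : ¬((decide (d ≤ th) && pvLtOpt d st.2) = true) := by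
        rw [Bool.and_eq_true, decide_eq_true_eq]
        intro ⟨h1, h2⟩
        exact h d (List.mem_cons_self) ⟨h1, h2⟩
      rw [if_neg hc]
      exact ih st (fun d' hd' => h d' (List.mem_cons_of_mem _ hd'))

theorem pvFoldU_min (plate : String) (th : Int) (ds : List Int) (dm : Int) :
    ∀ st : Option String × Option Int,
      dm ∈ ds → dm ≤ th → (∀ d ∈ ds, dm ≤ d) → pvLtOpt dm st.2 = true →
      ds.foldl (fun st d => if decide (d ≤ th) && pvLtOpt d st.2 then (some plate, some d) else st) st
        = (some plate, some dm) := by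
  induction ds with
  | nil => intro st hmem; simp at hmem
  | cons d tl ih =>
      intro st hmem hle hmin hlt
      rw [List.foldl_cons]
      by_cases hup : (decide (d ≤ th) && pvLtOpt d st.2) = true
      · rw [if_pos hup]
        by_cases hdm : dm = d
        · subst hdm
          rw [pvFoldU_skip plate th tl (some plate, some dm)]
          intro d' hd' hand
          have hlt' : d' < dm := by
            have := hand.2
            simp only [pvLtOpt, decide_eq_true_eq] at this
            exact this
          exact absurd hlt' (not_lt.mpr (hmin d' (List.mem_cons_of_mem _ hd')))
        · have hmemtl : dm ∈ tl := by
            rcases List.mem_cons.mp hmem with h | h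
            · exact absurd h hdm
            · exact h
          apply ih _ hmemtl hle (fun d' hd' => hmin d' (List.mem_cons_of_mem _ hd'))
          simp only [pvLtOpt, decide_eq_true_eq]
          exact lt_of_le_of_ne (hmin d List.mem_cons_self) hdm
      · rw [if_neg hup]
        have hmemtl : dm ∈ tl := by
          rcases List.mem_cons.mp hmem with h | h
          · exfalso
            apply hup
            rw [← h, Bool.and_eq_true, decide_eq_true_eq]
            exact ⟨hle, hlt⟩
          · exact h
        exact ih st hmemtl hle (fun d' hd' => hmin d' (List.mem_cons_of_mem _ hd')) hlt

-- ===== window bridge =====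
theorem pvWindow_prefix (t : List Char) (i w : Int) (hi : 0 ≤ i) (hw : 0 ≤ w) :
    (PySem.List.slice t (some i) (some (i + w))).reverse <+: (t.take (i.toNat + w.toNat)).reverse := by
  rw [PySem.List.slice_toNat t hi (by omega)]
  have h1 : (i + w).toNat - i.toNat = w.toNat := by omega
  rw [h1]
  apply List.reverse_prefix.mpr
  have h2 : (t.take (i.toNat + w.toNat)).drop i.toNat = (t.drop i.toNat).take w.toNat := by
    rw [List.drop_take]
    congr 1
    omega
  rw [← h2]
  exact List.drop_suffix _ _

theorem pvWindow_ge (t P : List Char) (d : Int) (i w : Int) (hi : 0 ≤ i) (hw : 0 ≤ w)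
    (hiw : i + w ≤ (t.length : Int))
    (hmin : ∀ x ∈ pvRowB P.reverse [] t, d ≤ x) :
    d ≤ pvLev (PySem.List.slice t (some i) (some (i + w))) P := by
  rw [pvLev_eq]
  have hj : i.toNat + w.toNat ≤ t.length := by omega
  have hrow : ((pvM P.reverse ((t.take (i.toNat + w.toNat)).reverse) : Nat) : Int) ∈ pvRowB P.reverse [] t := by
    rw [pvRowB_mem_iff]
    exact ⟨i.toNat + w.toNat, hj, by simp⟩
  have h1 := hmin _ hrow
  have h2 := pvM_le P.reverse ((t.take (i.toNat + w.toNat)).reverse) _ (pvWindow_prefix t i w hi hw)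
  have h2' : ((pvM P.reverse ((t.take (i.toNat + w.toNat)).reverse) : Nat) : Int)
      ≤ ((pvE (PySem.List.slice t (some i) (some (i + w))).reverse P.reverse : Nat) : Int) := by
    exact_mod_cast h2
  omega

theorem pvAttain (t P : List Char) (th : Int) (dN : Nat) (j : Nat) (hj : j ≤ t.length)
    (hdj : (dN : Int) = (pvM P.reverse ((t.take j).reverse) : Nat))
    (hmin : ∀ x ∈ pvRowB P.reverse [] t, (dN : Int) ≤ x)
    (hth : (dN : Int) ≤ th)
    (hpre : (P.length : Int) ≤ th → P ≠ [] ∧ t ≠ []) :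
    ∃ i w : Int, 0 ≤ i ∧ max 1 ((P.length : Int) - th) ≤ w ∧ w < (P.length : Int) + th + 1 ∧
      i < (t.length : Int) - w + 1 ∧
      pvLev (PySem.List.slice t (some i) (some (i + w))) P = (dN : Int) := by
  have hdjN : dN = pvM P.reverse ((t.take j).reverse) := by exact_mod_cast hdj
  obtain ⟨u, hu, hEu⟩ := pvM_ex P.reverse ((t.take j).reverse)
  by_cases hun : u = []
  · -- the empty window attains the minimum: dN = P.length ≤ th; use the window (0, 1)
    subst hun
    rw [pvE_nil] at hEu
    have hdL : dN = P.length := by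
      rw [hdjN, ← hEu]; simp
    have hLth : (P.length : Int) ≤ th := by rw [← hdL]; exact_mod_cast hth
    obtain ⟨hP, ht⟩ := hpre hLth
    have hN : 1 ≤ t.length := List.length_pos_iff.mpr ht
    have hL : 1 ≤ P.length := List.length_pos_iff.mpr hP
    refine ⟨0, 1, le_refl _, ?_, by omega, by omega, ?_⟩
    · rw [max_le_iff]; omega
    · have hge := pvWindow_ge t P (dN : Int) 0 1 (by omega) (by omega) (by omega) hmin
      have hle : pvLev (PySem.List.slice t (some 0) (some (0 + 1))) P ≤ (dN : Int) := by
        rw [pvLev_eq, PySem.List.slice_toNat t (by omega) (by omega)]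
        obtain ⟨c, t', rfl⟩ := List.exists_cons_of_ne_nil ht
        have h1 : List.take (((0 : Int) + 1).toNat - (0 : Int).toNat) (List.drop (0 : Int).toNat (c :: t')) = [c] := by
          norm_num
        rw [h1]
        have hsing := pvE_singleton c P.reverse (by simpa using hP)
        have : pvE [c].reverse P.reverse ≤ P.length := by simpa using hsing
        rw [hdL]
        exact_mod_cast this
      omega
  · -- a nonempty minimizing window
    have hsuf : u.reverse <:+ t.take j := by
      rw [← List.reverse_prefix]
      simpa using hu
    obtain ⟨pre, hsplit⟩ := hsuf
    have hlen : pre.length + u.length = j := by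
      have := congrArg List.length hsplit
      simp [List.length_take] at this
      omega
    have hw1 : 1 ≤ u.length := List.length_pos_iff.mpr hun
    have hdE : dN = pvE u P.reverse := by rw [hEu, hdjN]
    have hLle : P.length ≤ dN + u.length := by
      have h := pvE_lenLB u P.reverse
      rw [List.length_reverse] at h
      omega
    have hwle : u.length ≤ dN + P.length := by
      have h := pvE_lenLB' u P.reverse
      rw [List.length_reverse] at h
      omega
    refine ⟨(pre.length : Int), (u.length : Int), by omega, ?_, by omega, by omega, ?_⟩
    · rw [max_le_iff]
      constructor <;> omega
    · -- the window equals u.reverse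
      have hwin : PySem.List.slice t (some (pre.length : Int)) (some ((pre.length : Int) + (u.length : Int))) = u.reverse := by
        rw [PySem.List.slice_toNat t (by omega) (by omega)]
        have h1 : (((pre.length : Int) + (u.length : Int)).toNat - ((pre.length : Int)).toNat) = u.length := by omega
        have h2 : ((pre.length : Int)).toNat = pre.length := by omega
        rw [h1, h2]
        have h3 : (t.take j).drop pre.length = (t.drop pre.length).take u.length := by
          rw [List.drop_take]
          congr 1
          omega
        rw [← h3, ← hsplit]
        exact List.drop_left
      rw [hwin, pvLev_eq]
      simp only [List.reverse_reverse]
      exact_mod_cast hdE.symm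

-- ===== per-plate equivalence =====
theorem pvPlate_eq (t : List Char) (th : Int) (plate : String)
    (hpre : ((plate.toList.length : Int) ≤ th → plate.toList ≠ [] ∧ t ≠ [])) :
    ∀ st : Option String × Option Int,
    (PySem.List.pyRange (max 1 ((plate.toList.length : Int) - th)) ((plate.toList.length : Int) + th + 1) 1).foldl
      (fun st w => (PySem.List.pyRange 0 ((t.length : Int) - w + 1) 1).foldl
        (fun st i =>
          if decide (pvLev (PySem.List.slice t (some i) (some (i + w))) plate.toList ≤ th)
              && pvLtOpt (pvLev (PySem.List.slice t (some i) (some (i + w))) plate.toList) st.2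
          then (some plate, some (pvLev (PySem.List.slice t (some i) (some (i + w))) plate.toList)) else st) st) st
    = (match PySem.List.min? ((plate.toList.foldl (fun (acc : Int × List Int) pc =>
          (acc.1 + 1, (acc.1 + 1) :: pvAltRow pc acc.2 t (acc.1 + 1)))
          (0, List.replicate (t.length + 1) (0 : Int))).2) (fun x => x) with
       | none => st
       | some d => if decide (d ≤ th) && pvLtOpt d st.2 then (some plate, some d) else st) := by
  intro st
  -- identify B's final row
  have hfin : (plate.toList.foldl (fun (acc : Int × List Int) pc =>
        (acc.1 + 1, (acc.1 + 1) :: pvAltRow pc acc.2 t (acc.1 + 1)))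
        (0, List.replicate (t.length + 1) (0 : Int))).2 = pvRowB plate.toList.reverse [] t := by
    have h0 := pvFoldB t plate.toList []
    simp only [List.length_nil, Nat.cast_zero, List.reverse_nil, List.append_nil, Nat.zero_add] at h0
    rw [← pvRowB_init t [], h0]
  rw [hfin]
  -- B's minimum over the row
  rcases hm : PySem.List.min? (pvRowB plate.toList.reverse [] t) (fun x => x) with _ | d
  · exact absurd ((PySem.List.min?_eq_none_iff _ _).mp hm) (pvRowB_ne_nil _ _ _)
  have hdmem := PySem.List.min?_mem hm
  have hdlb : ∀ x ∈ pvRowB plate.toList.reverse [] t, d ≤ x := PySem.List.min?_isMin hm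
  obtain ⟨j, hj, hdj⟩ := (pvRowB_mem_iff plate.toList.reverse t [] d).mp hdmem
  rw [List.append_nil] at hdj
  -- flatten A's double fold into a single fold over the window distances
  rw [show (fun (st : Option String × Option Int) (w : Int) =>
        (PySem.List.pyRange 0 ((t.length : Int) - w + 1) 1).foldl
          (fun st i =>
            if decide (pvLev (PySem.List.slice t (some i) (some (i + w))) plate.toList ≤ th)
                && pvLtOpt (pvLev (PySem.List.slice t (some i) (some (i + w))) plate.toList) st.2
            then (some plate, some (pvLev (PySem.List.slice t (some i) (some (i + w))) plate.toList)) else st) st)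
      = (fun (st : Option String × Option Int) (w : Int) =>
        (((PySem.List.pyRange 0 ((t.length : Int) - w + 1) 1).map
            (fun i => pvLev (PySem.List.slice t (some i) (some (i + w))) plate.toList))).foldl
          (fun st d =>
            if decide (d ≤ th) && pvLtOpt d st.2 then (some plate, some d) else st) st)
      from funext fun st => funext fun w => by rw [List.foldl_map]]
  rw [← List.foldl_flatMap]
  set ds := (PySem.List.pyRange (max 1 ((plate.toList.length : Int) - th)) ((plate.toList.length : Int) + th + 1) 1).flatMap
      (fun w => (PySem.List.pyRange 0 ((t.length : Int) - w + 1) 1).map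
        (fun i => pvLev (PySem.List.slice t (some i) (some (i + w))) plate.toList)) with hds
  -- every window distance is at least d
  have hge : ∀ x ∈ ds, d ≤ x := by
    intro x hx
    rw [hds, List.mem_flatMap] at hx
    obtain ⟨w, hw, hx⟩ := hx
    rw [List.mem_map] at hx
    obtain ⟨i, hi, rfl⟩ := hx
    rw [PySem.List.mem_pyRange_one] at hw hi
    rw [hdj]
    apply pvWindow_ge t plate.toList _ i w (by omega) (by omega) (by omega)
    intro x hx
    rw [← hdj]
    exact hdlb x hx
  by_cases hth : d ≤ th
  · -- d is attained at some admissible window, hence d ∈ ds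
    have hmin' : ∀ x ∈ pvRowB plate.toList.reverse [] t, ((pvM plate.toList.reverse ((t.take j).reverse) : Nat) : Int) ≤ x := by
      rw [← hdj]; exact hdlb
    obtain ⟨i, w, hi0, hwlo, hwhi, hilt, hwin⟩ :=
      pvAttain t plate.toList th (pvM plate.toList.reverse ((t.take j).reverse)) j hj rfl hmin'
        (by rw [← hdj]; exact hth) hpre
    have hdmemds : d ∈ ds := by
      rw [hds, List.mem_flatMap]
      refine ⟨w, ?_, ?_⟩
      · rw [PySem.List.mem_pyRange_one]; omega
      · rw [List.mem_map]
        exact ⟨i, by rw [PySem.List.mem_pyRange_one]; omega, by rw [hwin, ← hdj]⟩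
    by_cases hlt : pvLtOpt d st.2 = true
    · rw [pvFoldU_min plate th ds d st hdmemds hth hge hlt]
      simp [hth, hlt]
    · rw [pvFoldU_skip plate th ds st]
      · rw [Bool.not_eq_true] at hlt
        simp [hlt]
      · intro x hx ⟨hx1, hx2⟩
        apply hlt
        simp only [pvLtOpt] at hx2 ⊢
        cases hst : st.2 with
        | none => rfl
        | some v =>
            rw [hst] at hx2
            simp only [decide_eq_true_eq] at hx2 ⊢
            have := hge x hx
            omega
  · -- nothing qualifies on either side
    rw [pvFoldU_skip plate th ds st]
    · simp [hth]
    · intro x hx ⟨hx1, _⟩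
      have := hge x hx
      omega

-- ===== VERDICT (by name: the statement is the Claim_ definition above) =====
theorem find_best_match_fuzzy_spec : Claim_equal_find_best_match_fuzzy := by
  intro ocr_text trusted_plates threshold _ hpre
  show find_best_match_fuzzy ocr_text trusted_plates threshold
      = find_best_match_fuzzy_alt ocr_text trusted_plates threshold
  unfold find_best_match_fuzzy find_best_match_fuzzy_alt
  refine congrArg Prod.fst ?_
  apply PySem.List.foldl_congr_mem
  intro st plate hmem
  exact pvPlate_eq ocr_text.toList threshold plate (hpre plate hmem) st
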